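-- pv_equiv track=rewrite | github.com/EfazAhmed/CodeSignal-Arcade | The Core/6_weak_numbers.py/48_weak_numbers.py | solution
-- ===== SOURCE A (Python) =====
-- def solution(n):
--     max_value = 0
--     count = 0
--     dlist = []
--     for i in range(1,n+1):
--         value = getDivisors(i)
--         temp = sorted(dlist, reverse=True)
--         t_count = 0
--         for i in range(len(temp)):
--             if temp[i] > value:
--                 t_count += 1
--             else:
--                 break
--         dlist.append(value)
--
--         if t_count > max_value:
--             max_value = t_count
--             count = 1
--         elif t_count == max_value:
--             count += 1
--
--     return [max_value, count]
--
-- def getDivisors(n):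
--     count = 1
--     for i in range(1, n+1//2):
--         if n % i == 0:
--             count += 1
--     return count
-- ===== SOURCE B (Python) =====
-- def solution(n):
--     # Sieve the divisor counts of 1..n in one pass over multiples,
--     # then count earlier-greater values by a direct scan (no per-step sort).
--     d = [0] * (n + 1)
--     for i in range(1, n + 1):
--         for j in range(i, n + 1, i):
--             d[j] += 1
--     best = 0
--     cnt = 0
--     seen = []
--     for i in range(1, n + 1):
--         v = d[i]
--         t = 0
--         for x in seen:
--             if x > v:
--                 t += 1
--         seen.append(v)
--         if t > best:
--             best = t
--             cnt = 1
--         elif t == best: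
--             cnt += 1
--     return [best, cnt]
-- ===== Notes on version B (the rewrite author's own statement) =====
-- stated objective: faster
-- what changed: Replaces per-element trial division with one multiples sieve for all divisor counts, and replaces the re-sort of the whole prefix at every step with a direct scan counting strictly greater earlier values.
import Mathlib
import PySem

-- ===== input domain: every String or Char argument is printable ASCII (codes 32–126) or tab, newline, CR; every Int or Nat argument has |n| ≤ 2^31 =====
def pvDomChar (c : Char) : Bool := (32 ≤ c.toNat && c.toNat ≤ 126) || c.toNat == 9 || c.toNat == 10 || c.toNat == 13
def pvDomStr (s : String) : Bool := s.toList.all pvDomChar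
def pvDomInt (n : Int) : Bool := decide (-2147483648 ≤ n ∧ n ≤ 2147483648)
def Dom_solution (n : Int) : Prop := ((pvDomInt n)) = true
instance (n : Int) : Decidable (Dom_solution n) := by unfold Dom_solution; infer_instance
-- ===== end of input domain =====

-- B replaces A's per-element trial division by one multiples sieve and A's per-step
-- re-sort by a direct count of strictly greater earlier values (objective: faster,
-- measured).

-- ===== PORT A =====
-- getDivisors(n): note Python's 'n+1//2' is 'n + (1//2)' = n, so the loop is range(1, n)
def getDivisors (m : Int) : Int :=
  (PySem.List.pyRange 1 (m + PySem.Int.floordiv 1 2) 1).foldl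
    (fun c i => if PySem.Int.mod m i == 0 then c + 1 else c) 1

-- A's inner 'for i in range(len(temp)): if temp[i] > value: t_count += 1 else: break'
-- loop: scans temp from index 0 and stops at the first element ≤ value
def prefixGt (l : List Int) (v : Int) : Int :=
  match l with
  | [] => 0
  | x :: t => if x > v then prefixGt t v + 1 else 0

-- sorted(dlist, reverse=True): CPython's sorted is a stable merge sort; with the
-- identity key equal elements are equal values, so the stable merge sort below
-- returns exactly Python's list (the unique ≥-ordered rearrangement of dlist)
def pySortedDesc (l : List Int) : List Int := l.mergeSort (fun a b => b ≤ a)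

def solution (n : Int) : List Int :=
  let st := (PySem.List.pyRange 1 (n + 1) 1).foldl
    (fun (st : Int × Int × List Int) i =>
      let value := getDivisors i
      let temp := pySortedDesc st.2.2
      let t_count := prefixGt temp value
      let dlist := st.2.2 ++ [value]
      if t_count > st.1 then (t_count, 1, dlist)
      else if t_count == st.1 then (st.1, st.2.1 + 1, dlist)
      else (st.1, st.2.1, dlist))
    (0, 0, ([] : List Int))
  [st.1, st.2.1]

-- ===== PORT B =====
-- the sieve: d = [0]*(n+1); for i in 1..n: for j in range(i, n+1, i): d[j] += 1
-- (every j hit is in range 1 ≤ j ≤ n < len d, so getD/set are exactly Python's d[j] += 1)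
def sieve (n : Int) : List Int :=
  (PySem.List.pyRange 1 (n + 1) 1).foldl
    (fun d i =>
      (PySem.List.pyRange i (n + 1) i).foldl
        (fun d j => d.set j.toNat (d.getD j.toNat 0 + 1)) d)
    (List.replicate (n + 1).toNat 0)

def solution_alt (n : Int) : List Int :=
  let d := sieve n
  let st := (PySem.List.pyRange 1 (n + 1) 1).foldl
    (fun (st : Int × Int × List Int) i =>
      let v := PySem.List.pyGetD d i 0      -- d[i]; 1 ≤ i ≤ n is always in range
      let t := st.2.2.foldl (fun t x => if x > v then t + 1 else t) 0
      let seen := st.2.2 ++ [v]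
      if t > st.1 then (t, 1, seen)
      else if t == st.1 then (st.1, st.2.1 + 1, seen)
      else (st.1, st.2.1, seen))
    (0, 0, ([] : List Int))
  [st.1, st.2.1]

-- ===== PRECONDITION & SPEC =====
def Spec_solution (n : Int) (out : List Int) : Prop := out = solution_alt n
instance (n : Int) (out : List Int) : Decidable (Spec_solution n out) := by unfold Spec_solution; infer_instance

-- ===== CLAIM (what is proved, stated in full; the proofs are below) =====
def Claim_equal_solution : Prop := ∀ (n : Int), Dom_solution n → Spec_solution n (solution n)

-- ===== LEMMAS AND PROOFS =====

lemma nodup_pyRange_of_pos (a b s : Int) (hs : 0 < s) :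
    (PySem.List.pyRange a b s).Nodup := by
  rw [PySem.List.pyRange_of_pos a b hs]
  refine List.Nodup.map ?_ List.nodup_range
  intro x y hxy
  have h : s * (x : Int) = s * (y : Int) := by
    have := add_left_cancel hxy
    linarith
  have := mul_left_cancel₀ (ne_of_gt hs) h
  exact_mod_cast this

-- the sieve's inner loop: increment each listed position once
lemma bump_length (js : List Int) (d : List Int) :
    (js.foldl (fun d j => d.set j.toNat (d.getD j.toNat 0 + 1)) d).length = d.length := by
  induction js generalizing d with
  | nil => rfl
  | cons j t ih => rw [List.foldl_cons, ih]; simp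

lemma bump_getD (js : List Int) (d : List Int) (hNd : js.Nodup)
    (hin : ∀ j ∈ js, 0 ≤ j ∧ j.toNat < d.length) (p : Nat) :
    (js.foldl (fun d j => d.set j.toNat (d.getD j.toNat 0 + 1)) d).getD p 0
      = d.getD p 0 + (if (p : Int) ∈ js then 1 else 0) := by
  induction js generalizing d with
  | nil => simp
  | cons j t ih =>
    obtain ⟨hj0, hjlt⟩ := hin j (List.mem_cons_self ..)
    rw [List.foldl_cons,
      ih (d.set j.toNat (d.getD j.toNat 0 + 1)) hNd.of_cons
        (by intro x hx; simpa using hin x (List.mem_cons_of_mem _ hx))]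
    have hjt : j ∉ t := (List.nodup_cons.mp hNd).1
    by_cases hpj : j.toNat = p
    · have hpI : (p : Int) = j := by omega
      have hpt : (p : Int) ∉ t := by rw [hpI]; exact hjt
      simp [List.getD_eq_getElem?_getD, hpj, hpj ▸ hjlt, hpI]
      omega
    · have hpI : (p : Int) ≠ j := by omega
      simp [List.getD_eq_getElem?_getD, hpj, hpI]

lemma sieve_fold_length (n : Int) (ks : List Int) (d : List Int)
    (hk : ∀ k ∈ ks, 1 ≤ k) :
    (ks.foldl (fun d k =>
        (PySem.List.pyRange k (n + 1) k).foldl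
          (fun d j => d.set j.toNat (d.getD j.toNat 0 + 1)) d) d).length = d.length := by
  induction ks generalizing d with
  | nil => rfl
  | cons k t ih =>
    rw [List.foldl_cons, ih _ (fun x hx => hk x (List.mem_cons_of_mem _ hx)), bump_length]

-- the whole sieve fold: position p holds the number of outer indices k whose
-- multiples list contains p
lemma sieve_fold_getD (n : Int) (ks : List Int) (d : List Int)
    (hk : ∀ k ∈ ks, 1 ≤ k) (hlen : d.length = (n + 1).toNat) (p : Nat) :
    (ks.foldl (fun d k =>
        (PySem.List.pyRange k (n + 1) k).foldl
          (fun d j => d.set j.toNat (d.getD j.toNat 0 + 1)) d) d).getD p 0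
      = d.getD p 0
        + (ks.countP (fun k => decide ((p : Int) ∈ PySem.List.pyRange k (n + 1) k)) : Int) := by
  induction ks generalizing d with
  | nil => simp
  | cons k t ih =>
    have hk1 : 1 ≤ k := hk k (List.mem_cons_self ..)
    have hkpos : (0 : Int) < k := by omega
    rw [List.foldl_cons,
      ih _ (fun x hx => hk x (List.mem_cons_of_mem _ hx))
        (by rw [bump_length]; exact hlen),
      bump_getD _ _ (nodup_pyRange_of_pos k (n + 1) k hkpos)
        (by
          intro j hj
          obtain ⟨hja, hjb, -⟩ := (PySem.List.mem_pyRange_iff_of_pos hkpos j).mp hj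
          constructor
          · omega
          · rw [hlen]; omega)]
    rw [List.countP_cons]
    by_cases hmem : (p : Int) ∈ PySem.List.pyRange k (n + 1) k
    · simp [hmem]; omega
    · simp [hmem]

-- d[i] of the finished sieve is exactly A's getDivisors(i), for 1 ≤ i ≤ n
lemma sieve_getDivisors (n i : Int) (h1 : 1 ≤ i) (h2 : i < n + 1) :
    PySem.List.pyGetD (sieve n) i 0 = getDivisors i := by
  have hlen : (sieve n).length = (n + 1).toNat := by
    unfold sieve
    rw [sieve_fold_length]
    · simp
    · intro k hk; exact ((PySem.List.mem_pyRange_one).mp hk).1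
  have hil : i < ((sieve n).length : Int) := by rw [hlen]; omega
  rw [PySem.List.pyGetD_eq_getElem _ _ (by omega) hil]
  have hget : (sieve n)[i.toNat] = (sieve n).getD i.toNat 0 := by
    rw [List.getD_eq_getElem?_getD, List.getElem?_eq_getElem (by omega)]
    rfl
  rw [hget]
  unfold sieve
  rw [sieve_fold_getD n _ _ (fun k hk => ((PySem.List.mem_pyRange_one).mp hk).1)
    (by simp) i.toNat]
  have hpI : (i.toNat : Int) = i := by omega
  rw [hpI]
  have hrepl : (List.replicate (n + 1).toNat (0 : Int)).getD i.toNat 0 = 0 := by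
    exact List.getD_replicate 0 (by omega)
  rw [hrepl, zero_add]
  -- rewrite the sieve-membership predicate to 'k ≤ i ∧ k ∣ i' on the range's members
  have hcongr :
      (PySem.List.pyRange 1 (n + 1) 1).countP
          (fun k => decide (i ∈ PySem.List.pyRange k (n + 1) k))
        = (PySem.List.pyRange 1 (n + 1) 1).countP
          (fun k => decide (k ≤ i ∧ k ∣ i)) := by
    apply List.countP_congr
    intro k hk
    obtain ⟨hk1, hkn⟩ := (PySem.List.mem_pyRange_one).mp hk
    have hkpos : (0 : Int) < k := by omega
    simp only [decide_eq_true_eq]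
    rw [PySem.List.mem_pyRange_iff_of_pos hkpos]
    constructor
    · rintro ⟨ha, -, hd⟩
      exact ⟨ha, by simpa using hd.add (dvd_refl k)⟩
    · rintro ⟨ha, hd⟩
      exact ⟨ha, h2, hd.sub (dvd_refl k)⟩
  rw [hcongr]
  -- split the range at i+1 and peel off k = i
  rw [PySem.List.pyRange_one_append 1 (i + 1) (n + 1) (by omega) (by omega),
    List.countP_append,
    PySem.List.pyRange_one_succ_right (a := 1) (b := i) (by omega),
    List.countP_append]
  have htail :
      (PySem.List.pyRange (i + 1) (n + 1) 1).countP (fun k => decide (k ≤ i ∧ k ∣ i)) = 0 := by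
    rw [List.countP_eq_zero]
    intro k hk
    obtain ⟨hk1, -⟩ := (PySem.List.mem_pyRange_one).mp hk
    simp only [decide_eq_true_eq]
    rintro ⟨ha, -⟩; omega
  have hself : List.countP (fun k => decide (k ≤ i ∧ k ∣ i)) [i] = 1 := by
    simp
  have hmain :
      (PySem.List.pyRange 1 i 1).countP (fun k => decide (k ≤ i ∧ k ∣ i))
        = (PySem.List.pyRange 1 i 1).countP (fun j => PySem.Int.mod i j == 0) := by
    apply List.countP_congr
    intro k hk
    obtain ⟨hk1, hki⟩ := (PySem.List.mem_pyRange_one).mp hk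
    simp only [decide_eq_true_eq, beq_iff_eq, PySem.Int.mod_eq_zero_iff_dvd]
    constructor
    · rintro ⟨-, hd⟩; exact hd
    · intro hd; exact ⟨by omega, hd⟩
  rw [htail, hself, hmain]
  unfold getDivisors
  have hfl : PySem.Int.floordiv 1 2 = 0 := by decide
  simp only [hfl, add_zero]
  rw [PySem.List.foldl_if_add_one (fun j => PySem.Int.mod i j == 0) (PySem.List.pyRange 1 i 1) 1]
  push_cast
  ring

-- the break-scan over a descending-sorted list counts the strictly greater elements
lemma prefixGt_pairwise (l : List Int) (v : Int)
    (h : l.Pairwise (fun a b => b ≤ a)) :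
    prefixGt l v = (l.countP (fun x => decide (x > v)) : Int) := by
  induction l with
  | nil => rfl
  | cons x t ih =>
    rcases List.pairwise_cons.mp h with ⟨hx, ht⟩
    by_cases hxv : x > v
    · simp [prefixGt, hxv, ih ht]
    · have : t.countP (fun x => decide (x > v)) = 0 := by
        rw [List.countP_eq_zero]
        intro y hy
        simp only [decide_eq_true_eq]
        exact fun hyv => hxv (lt_of_lt_of_le hyv (hx y hy))
      simp [prefixGt, hxv, this]

lemma prefixGt_sorted (l : List Int) (v : Int) :
    prefixGt (pySortedDesc l) v
      = l.foldl (fun t x => if x > v then t + 1 else t) 0 := by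
  rw [PySem.List.foldl_ite_add_one]
  have hpw : (pySortedDesc l).Pairwise (fun a b => b ≤ a) := by
    have := List.pairwise_mergeSort (le := fun a b : Int => decide (b ≤ a))
      (fun a b c hab hbc => by
        simp only [decide_eq_true_eq] at *; omega)
      (fun a b => by
        simp only [Bool.or_eq_true, decide_eq_true_eq]; omega) l
    exact this.imp (by simp)
  rw [prefixGt_pairwise _ v hpw]
  have hperm : (pySortedDesc l).Perm l := List.mergeSort_perm l _
  rw [List.Perm.countP_eq _ hperm]
  simp

-- ===== VERDICT (by name: the statement is the Claim_ definition above) =====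
theorem solution_spec : Claim_equal_solution := by
  intro n _
  unfold Spec_solution solution solution_alt
  refine congrArg (fun st : Int × Int × List Int => [st.1, st.2.1]) ?_
  apply PySem.List.foldl_congr_mem
  intro acc i hi
  obtain ⟨h1, h2⟩ := (PySem.List.mem_pyRange_one).mp hi
  simp only [prefixGt_sorted, sieve_getDivisors n i h1 h2]
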